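-- pv_equiv track=rewrite | github.com/AidanHilt/PersonalMonorepo | atils/wrapper/languages/python/implementation/pythonInstaller/installWrapper.py | buildAndReturnBoundaryString
-- ===== SOURCE A (Python) =====
-- def buildAndReturnBoundaryString(message, input=False):
--     if(message):
--         boundaryString = ""
--         boundaryStringLength = 0
--
--         for i in range(0, len(message)):
--             boundaryStringLength += 1
--
--         if input:
--             for i in range(0, len(message) // 3):
--                 boundaryStringLength += 1
--         else:
--             for i in range(0, len(message) // 5):
--                 boundaryStringLength += 1
--
--         if boundaryStringLength > 93:
--             boundaryStringLength = 93
--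
--         for i in range(0, boundaryStringLength):
--             boundaryString += "="
--
--         return boundaryString
--
--     else:
--         return "\n==================\n"
-- ===== SOURCE B (Python) =====
-- def buildAndReturnBoundaryString(message, input=False):
--     if not message:
--         return "\n==================\n"
--     n = len(message)
--     return "=" * min(n + n // (3 if input else 5), 93)
-- ===== Notes on version B (the rewrite author's own statement) =====
-- stated objective: faster
-- what changed: Replaces the two counting loops and the per-character string accumulation with a closed-form length min(len+len//k, 93) and a single string repetition.
import Mathlib
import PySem

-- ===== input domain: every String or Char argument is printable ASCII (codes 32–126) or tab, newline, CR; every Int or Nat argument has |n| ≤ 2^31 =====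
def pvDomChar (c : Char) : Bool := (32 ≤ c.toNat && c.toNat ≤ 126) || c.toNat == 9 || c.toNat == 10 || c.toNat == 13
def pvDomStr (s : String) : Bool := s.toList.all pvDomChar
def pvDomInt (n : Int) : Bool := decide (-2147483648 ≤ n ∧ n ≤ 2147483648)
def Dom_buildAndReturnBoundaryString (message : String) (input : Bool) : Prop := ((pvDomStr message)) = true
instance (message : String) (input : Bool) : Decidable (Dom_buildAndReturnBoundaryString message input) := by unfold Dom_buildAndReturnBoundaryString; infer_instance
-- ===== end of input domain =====

-- B replaces A's counting loops and per-character '=' concatenation by a closed-form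
-- length min(len + len//k, 93) and a single repetition (faster: no per-character loop over len).

-- ===== PORT A =====
def buildAndReturnBoundaryString (message : String) (input : Bool) : String :=
  if message ≠ "" then
    let boundaryString : String := ""
    let boundaryStringLength : Int := 0
    let boundaryStringLength :=
      (PySem.List.pyRange 0 (PySem.Str.len message) 1).foldl
        (fun acc _ => acc + 1) boundaryStringLength
    let boundaryStringLength :=
      if input then
        (PySem.List.pyRange 0 (PySem.Int.floordiv (PySem.Str.len message) 3) 1).foldl
          (fun acc _ => acc + 1) boundaryStringLength
      else
        (PySem.List.pyRange 0 (PySem.Int.floordiv (PySem.Str.len message) 5) 1).foldl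
          (fun acc _ => acc + 1) boundaryStringLength
    let boundaryStringLength :=
      if boundaryStringLength > 93 then (93 : Int) else boundaryStringLength
    (PySem.List.pyRange 0 boundaryStringLength 1).foldl
      (fun acc _ => acc ++ "=") boundaryString
  else
    "\n==================\n"

-- ===== PORT B =====
def buildAndReturnBoundaryString_alt (message : String) (input : Bool) : String :=
  if message = "" then
    "\n==================\n"
  else
    let n : Int := PySem.Str.len message
    String.ofList (List.replicate (min (n + PySem.Int.floordiv n (if input then 3 else 5)) 93).toNat '=')

-- ===== PRECONDITION & SPEC =====
def Spec_buildAndReturnBoundaryString (message : String) (input : Bool) (out : String) : Prop := out = buildAndReturnBoundaryString_alt message input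
instance (message : String) (input : Bool) (out : String) : Decidable (Spec_buildAndReturnBoundaryString message input out) := by unfold Spec_buildAndReturnBoundaryString; infer_instance

-- ===== CLAIM (what is proved, stated in full; the proofs are below) =====
def Claim_equal_buildAndReturnBoundaryString : Prop := ∀ (message : String) (input : Bool), Dom_buildAndReturnBoundaryString message input → Spec_buildAndReturnBoundaryString message input (buildAndReturnBoundaryString message input)

-- ===== LEMMAS AND PROOFS =====

theorem foldl_count (l : List Int) (c : Int) :
    l.foldl (fun acc (_ : Int) => acc + 1) c = c + l.length := by
  induction l generalizing c with
  | nil => simp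
  | cons x xs ih => simp [List.foldl, ih]; omega

theorem pyRange_len (n : Int) : (PySem.List.pyRange 0 n 1).length = n.toNat := by
  rw [PySem.List.pyRange_one]
  simp

theorem foldl_eq (l : List Int) (s : List Char) :
    l.foldl (fun acc (_ : Int) => acc ++ "=") (String.ofList s)
      = String.ofList (s ++ List.replicate l.length '=') := by
  induction l generalizing s with
  | nil => simp
  | cons x xs ih =>
    have h : String.ofList s ++ "=" = String.ofList (s ++ ['=']) := by simp
    rw [List.foldl_cons, h, ih]
    simp [List.replicate_succ]

theorem build_eq (L : Int) :
    (PySem.List.pyRange 0 L 1).foldl (fun acc (_ : Int) => acc ++ "=") ""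
      = String.ofList (List.replicate L.toNat '=') := by
  have h0 : ("" : String) = String.ofList [] := rfl
  rw [h0, foldl_eq, pyRange_len]
  simp

-- ===== VERDICT (by name: the statement is the Claim_ definition above) =====
theorem buildAndReturnBoundaryString_spec : Claim_equal_buildAndReturnBoundaryString := by
  intro message input _
  unfold Spec_buildAndReturnBoundaryString buildAndReturnBoundaryString buildAndReturnBoundaryString_alt
  by_cases hm : message = ""
  · simp [hm]
  · simp only [hm, ne_eq, not_false_eq_true, if_true]
    have hlen : (0:Int) ≤ PySem.Str.len message := by
      simp [PySem.Str.len_eq]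
    set n : Int := PySem.Str.len message with hn
    cases input with
    | true =>
      have h3 : 0 ≤ PySem.Int.floordiv n 3 := by
        rw [PySem.Int.floordiv_eq_ediv_of_pos (by norm_num)]
        exact Int.ediv_nonneg hlen (by norm_num)
      simp only [if_true]
      rw [foldl_count, foldl_count, pyRange_len, pyRange_len, build_eq]
      congr 2
      split_ifs with h <;> omega
    | false =>
      have h5 : 0 ≤ PySem.Int.floordiv n 5 := by
        rw [PySem.Int.floordiv_eq_ediv_of_pos (by norm_num)]
        exact Int.ediv_nonneg hlen (by norm_num)
      simp only [Bool.false_eq_true, if_false]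
      rw [foldl_count, foldl_count, pyRange_len, pyRange_len, build_eq]
      congr 2
      split_ifs with h <;> omega
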